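-- pv_equiv track=rewrite | github.com/dmiyakawa/atcoder-workspace | joi2008yo/E/main.py | _count
-- ===== SOURCE A (Python) =====
-- def _count(R, C, rows, index_to_flip):
--     ret = 0
--     for i in range(C):
--         c0, c1 = 0, 0
--         for j in range(R):
--             if rows[j][i] == (1 if (index_to_flip >> j & 1) else 0):
--                 c0 += 1
--             else:
--                 c1 += 1
--         ret += max(c0, c1)
--     return ret
-- ===== SOURCE B (Python) =====
-- def _count(R, C, rows, index_to_flip):
--     if R <= 0 or C <= 0:
--         return 0
--     cnt = [0] * C
--     for j in range(R):
--         row, bit = rows[j], (index_to_flip >> j) & 1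
--         cnt = [c + (row[i] == bit) for i, c in enumerate(cnt)]
--     return sum(max(c, R - c) for c in cnt)
-- ===== Notes on version B (the rewrite author's own statement) =====
-- stated objective: alternative
-- what changed: Replaced the column-major double loop that counts c0 and c1 separately per column by a single row-major pass maintaining a per-column count array cnt, deriving the complement as R - cnt[i] (using c0 + c1 = R) in the final sum of maxima.
import Mathlib
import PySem

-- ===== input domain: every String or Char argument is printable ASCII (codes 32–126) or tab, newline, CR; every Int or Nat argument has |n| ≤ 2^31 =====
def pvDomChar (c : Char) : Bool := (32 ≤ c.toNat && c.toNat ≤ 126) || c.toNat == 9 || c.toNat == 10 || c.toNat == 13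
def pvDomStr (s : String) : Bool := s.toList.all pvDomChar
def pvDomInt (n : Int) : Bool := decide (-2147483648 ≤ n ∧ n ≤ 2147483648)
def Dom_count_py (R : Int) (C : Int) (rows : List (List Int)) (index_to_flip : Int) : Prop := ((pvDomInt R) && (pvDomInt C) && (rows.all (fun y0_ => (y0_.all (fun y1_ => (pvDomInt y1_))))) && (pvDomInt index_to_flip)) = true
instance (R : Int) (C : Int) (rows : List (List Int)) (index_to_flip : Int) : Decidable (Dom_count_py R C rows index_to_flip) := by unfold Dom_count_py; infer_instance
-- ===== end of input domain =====

-- B replaces A's column-major double loop (separate c0/c1 counters per column) by one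
-- row-major pass over a per-column count array, deriving the complement as R - cnt[i];
-- objective: alternative decomposition (same asymptotic cost).

-- ===== PORT A =====
def count_py (R : Int) (C : Int) (rows : List (List Int)) (index_to_flip : Int) : Int :=
  (PySem.List.pyRange 0 C 1).foldl (fun ret i =>
    let cc := (PySem.List.pyRange 0 R 1).foldl (fun (cc : Int × Int) j =>
      if PySem.List.pyGetD (PySem.List.pyGetD rows j []) i 0 =
         (if PySem.Int.band (index_to_flip >>> j.toNat) 1 ≠ 0 then 1 else 0)
      then (cc.1 + 1, cc.2) else (cc.1, cc.2 + 1)) (0, 0)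
    ret + max cc.1 cc.2) 0

-- ===== PORT B =====
def count_py_alt (R : Int) (C : Int) (rows : List (List Int)) (index_to_flip : Int) : Int :=
  if R ≤ 0 ∨ C ≤ 0 then 0
  else
    let cnt := (PySem.List.pyRange 0 R 1).foldl (fun cnt j =>
        let row := PySem.List.pyGetD rows j []
        let bit := PySem.Int.band (index_to_flip >>> j.toNat) 1
        (PySem.List.enumerate cnt 0).map (fun p =>
          p.2 + (if PySem.List.pyGetD row p.1 0 = bit then 1 else 0)))
      (List.replicate C.toNat (0 : Int))
    (cnt.map (fun c => max c (R - c))).sum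

-- ===== PRECONDITION & SPEC =====
-- Pre_ holds exactly on the inputs where Python A returns (A raises IndexError iff
-- R > 0 and C > 0 and rows has fewer than R rows or one of the first R rows has
-- fewer than C entries); Python B raises on exactly the same inputs.
def Pre_count_py (R : Int) (C : Int) (rows : List (List Int)) (index_to_flip : Int) : Prop :=
  0 < R → 0 < C → (R ≤ (rows.length : Int) ∧ ∀ r ∈ rows.take R.toNat, C ≤ (r.length : Int))
instance (R : Int) (C : Int) (rows : List (List Int)) (index_to_flip : Int) : Decidable (Pre_count_py R C rows index_to_flip) := by unfold Pre_count_py; infer_instance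

def pvWitness_count_py : Int × Int × List (List Int) × Int := (2, 2, [[0, 1], [1, 1]], 2)

def Spec_count_py (R : Int) (C : Int) (rows : List (List Int)) (index_to_flip : Int) (out : Int) : Prop := out = count_py_alt R C rows index_to_flip
instance (R : Int) (C : Int) (rows : List (List Int)) (index_to_flip : Int) (out : Int) : Decidable (Spec_count_py R C rows index_to_flip out) := by unfold Spec_count_py; infer_instance

-- ===== CLAIM (what is proved, stated in full; the proofs are below) =====
def Claim_equal_count_py : Prop := ∀ (R : Int) (C : Int) (rows : List (List Int)) (index_to_flip : Int), Dom_count_py R C rows index_to_flip → Pre_count_py R C rows index_to_flip → Spec_count_py R C rows index_to_flip (count_py R C rows index_to_flip)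

-- ===== LEMMAS AND PROOFS =====
-- proof-only helpers (used only below the claim)
def pvBit (f j : Int) : Int := PySem.Int.band (f >>> j.toNat) 1
def pvHit (rows : List (List Int)) (f i j : Int) : Bool :=
  decide (PySem.List.pyGetD (PySem.List.pyGetD rows j []) i 0 = pvBit f j)
def pvCnt (rows : List (List Int)) (f R i : Int) : Int :=
  ((PySem.List.pyRange 0 R 1).countP (pvHit rows f i) : Int)
def pvTarget (R C : Int) (rows : List (List Int)) (f : Int) : Int :=
  ((PySem.List.pyRange 0 C 1).map (fun i => max (pvCnt rows f R i) (R - pvCnt rows f R i))).sum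

lemma pvBit01 (f j : Int) : pvBit f j = 0 ∨ pvBit f j = 1 := by
  have h := PySem.Int.band_one (f >>> j.toNat)
  have h1 := PySem.Int.mod_nonneg (f >>> j.toNat) (b := 2) (by omega)
  have h2 := PySem.Int.mod_lt (f >>> j.toNat) (b := 2) (by omega)
  unfold pvBit; omega

lemma pvBit_if (f j : Int) :
    (if PySem.Int.band (f >>> j.toNat) 1 ≠ 0 then (1:Int) else 0) = pvBit f j := by
  rcases pvBit01 f j with h | h <;> unfold pvBit at * <;> simp [h]

-- A's inner loop: the pair of counters is (matches, total - matches)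
lemma pvPairFold (l : List Int) (p : Int → Bool) (a b : Int) :
    l.foldl (fun (cc : Int × Int) j => if p j then (cc.1 + 1, cc.2) else (cc.1, cc.2 + 1)) (a, b)
      = (a + (l.countP p : Int), b + (l.length : Int) - (l.countP p : Int)) := by
  induction l generalizing a b with
  | nil => simp
  | cons x t ih =>
    by_cases hx : p x <;>
      simp [List.foldl_cons, hx, ih, Prod.ext_iff] <;> omega

lemma pvMax_eq (R c : Int)
    (hlen : ((PySem.List.pyRange 0 R 1).length : Int) = max R 0)
    (hc0 : R < 0 → c = 0) :
    max c (((PySem.List.pyRange 0 R 1).length : Int) - c) = max c (R - c) := by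
  rcases (show 0 ≤ R ∨ R < 0 by omega) with hR | hR
  · rw [hlen, max_eq_left hR]
  · rw [hlen, hc0 hR, max_eq_right hR.le]; simp; omega

lemma pvA_eq (R C : Int) (rows : List (List Int)) (f : Int) :
    count_py R C rows f = pvTarget R C rows f := by
  unfold count_py pvTarget
  rw [PySem.List.foldl_congr_mem'
    (g := fun ret i => ret + max (pvCnt rows f R i) (R - pvCnt rows f R i))]
  · rw [PySem.List.foldl_add]; simp
  · intro i _ ret
    simp only [pvBit_if]
    have hfun : (fun (cc : Int × Int) j =>
          if PySem.List.pyGetD (PySem.List.pyGetD rows j []) i 0 = pvBit f j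
          then (cc.1 + 1, cc.2) else (cc.1, cc.2 + 1))
        = (fun (cc : Int × Int) j => if pvHit rows f i j then (cc.1 + 1, cc.2) else (cc.1, cc.2 + 1)) := by
      funext cc j; simp [pvHit]
    rw [hfun, pvPairFold]
    simp only [zero_add]
    congr 1
    apply pvMax_eq
    · rw [PySem.List.length_pyRange_one]; omega
    · intro hR
      simp [PySem.List.pyRange_one_eq_nil (show R ≤ (0:Int) by omega)]

lemma pvBfold (rows : List (List Int)) (f : Int) (js : List Int) (n : Nat) (g : Int → Int) :
    js.foldl (fun cnt j =>
        (PySem.List.enumerate cnt 0).map (fun p =>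
          p.2 + (if PySem.List.pyGetD (PySem.List.pyGetD rows j []) p.1 0
                    = PySem.Int.band (f >>> j.toNat) 1 then 1 else 0)))
      ((PySem.List.pyRange 0 (n : Int) 1).map g)
      = (PySem.List.pyRange 0 (n : Int) 1).map
          (fun i => g i + (js.countP (fun j => pvHit rows f i j) : Int)) := by
  induction js generalizing g with
  | nil => simp
  | cons j t ih =>
    have hstep :
        (PySem.List.enumerate ((PySem.List.pyRange 0 (n:Int) 1).map g) 0).map (fun p =>
            p.2 + (if PySem.List.pyGetD (PySem.List.pyGetD rows j []) p.1 0
                      = PySem.Int.band (f >>> j.toNat) 1 then 1 else 0))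
          = (PySem.List.pyRange 0 (n:Int) 1).map
              (fun i => g i + (if pvHit rows f i j then (1:Int) else 0)) := by
      rw [PySem.List.enumerate_eq_map_pyRange _ 0]
      have hlen : PySem.List.len ((PySem.List.pyRange 0 (n:Int) 1).map g) = (n : Int) := by
        simp [PySem.List.len_eq, PySem.List.length_pyRange_one]
      rw [hlen, List.map_map]
      apply List.map_congr_left
      intro k hk
      rcases PySem.List.mem_pyRange_one.mp hk with ⟨hk0, hkn⟩
      simp only [Function.comp]
      rw [PySem.List.pyGetD_map_pyRange_of_nonneg g (n:Int) k 0 hk0 hkn]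
      simp [pvHit, pvBit]
    rw [List.foldl_cons, hstep, ih]
    apply List.map_congr_left
    intro i _
    simp [List.countP_cons, pvHit]
    split_ifs <;> ring

lemma pvB_eq (R C : Int) (rows : List (List Int)) (f : Int) :
    count_py_alt R C rows f = pvTarget R C rows f := by
  by_cases h : R ≤ 0 ∨ C ≤ 0
  · rw [show count_py_alt R C rows f = 0 from by unfold count_py_alt; rw [if_pos h]]
    unfold pvTarget
    rcases (show C ≤ 0 ∨ 0 < C by omega) with hC | hC
    · rw [PySem.List.pyRange_one_eq_nil (by omega)]; simp
    · have hR : R ≤ 0 := by omega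
      symm; apply List.sum_eq_zero
      intro x hx
      simp only [List.mem_map] at hx
      obtain ⟨i, _, rfl⟩ := hx
      have hc : pvCnt rows f R i = 0 := by
        simp [pvCnt, PySem.List.pyRange_one_eq_nil (show R ≤ (0:Int) by omega)]
      rw [hc]
      simpa using max_eq_left (show R - 0 ≤ (0:Int) by omega)
  · rw [not_or] at h; simp only [not_le] at h
    obtain ⟨hR, hC⟩ := h
    have hn : ((C.toNat : Int)) = C := by omega
    have hinit : List.replicate C.toNat (0:Int)
        = (PySem.List.pyRange 0 (C.toNat : Int) 1).map (fun _ => 0) := by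
      simp [List.map_const', PySem.List.length_pyRange_one]
      omega
    simp only [count_py_alt]
    rw [if_neg (by omega)]
    rw [hinit, pvBfold rows f (PySem.List.pyRange 0 R 1) C.toNat (fun _ => 0), hn]
    unfold pvTarget pvCnt
    rw [List.map_map]
    congr 1
    apply List.map_congr_left
    intro i _
    simp

-- ===== VERDICT (by name: the statement is the Claim_ definition above) =====
theorem count_py_spec : Claim_equal_count_py := by
  intro R C rows f _ _
  unfold Spec_count_py
  rw [pvA_eq, pvB_eq]
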